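-- pv_equiv track=rewrite | github.com/al4an2/al4an_leetcode | tasks/array/1536_Minimum_Swaps_to_Arrange_a_Binary_Grid.py | minSwaps
-- ===== SOURCE A (Python) =====
-- def minSwaps(grid: list[list[int]]) -> int:
--     n = len(grid)
--     swaps = 0
--     num_z = []
--     for i in range(n):
--         res = 0
--         for j in reversed(grid[i]):
--             if j == 0:
--                 res += 1
--             else:
--                 break
--         num_z.append(res)
--
--     for idx in range(n):
--         need = n - idx - 1
--
--         if num_z[idx] >= need:
--             continue
--
--         j = idx
--         while j < n and num_z[j] < need:
--             j += 1
--
--         if j == n: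
--             return -1
--
--         while j > idx:
--             num_z[j], num_z[j - 1] = num_z[j - 1], num_z[j]
--             swaps += 1
--             j -= 1
--
--     return swaps
-- ===== SOURCE B (Python) =====
-- def minSwaps(grid: list[list[int]]) -> int:
--     n = len(grid)
--     # trailing zeros of each row from the last non-zero position, found by a forward scan
--     zs = []
--     for row in grid:
--         last = -1
--         for i, v in enumerate(row):
--             if v != 0:
--                 last = i
--         zs.append(len(row) - 1 - last)
--     # build the target permutation p: for each target slot, the first still-unused
--     # original row whose trailing-zero count suffices (no list mutation / simulation)
--     used = [False] * n
--     p = []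
--     for idx in range(n):
--         need = n - idx - 1
--         j = next((j for j in range(n) if not used[j] and zs[j] >= need), None)
--         if j is None:
--             return -1
--         used[j] = True
--         p.append(j)
--     # the number of adjacent swaps is exactly the inversion count of p
--     inv = 0
--     for s in range(n):
--         x = p[s]
--         inv += sum(1 for y in p[s + 1:] if y < x)
--     return inv
-- ===== Notes on version B (the rewrite author's own statement) =====
-- stated objective: alternative
-- what changed: Instead of simulating the rearrangement (bubbling rows with adjacent swaps in a mutable trailing-zero list), B first computes the target permutation greedily with a used-marks array and then returns its inversion count; trailing zeros come from a forward scan for the last non-zero index instead of a reversed break scan.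
import Mathlib
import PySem

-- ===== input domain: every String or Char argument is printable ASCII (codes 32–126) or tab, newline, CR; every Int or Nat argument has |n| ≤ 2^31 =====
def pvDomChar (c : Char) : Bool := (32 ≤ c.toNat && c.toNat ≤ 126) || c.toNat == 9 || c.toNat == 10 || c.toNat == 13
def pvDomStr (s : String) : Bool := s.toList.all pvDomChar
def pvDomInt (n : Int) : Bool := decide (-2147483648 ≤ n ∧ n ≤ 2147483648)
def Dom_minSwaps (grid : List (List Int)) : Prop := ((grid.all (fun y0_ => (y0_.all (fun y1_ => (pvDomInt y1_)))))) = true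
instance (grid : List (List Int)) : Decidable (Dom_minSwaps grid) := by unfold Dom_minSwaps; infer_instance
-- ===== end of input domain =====

-- B replaces A's in-place simulation (bubbling rows by adjacent swaps in a mutable
-- trailing-zero list) by building the target permutation with used-marks and returning
-- its inversion count (objective: alternative; same return value everywhere).

-- ===== PORT A =====

-- trailing-zero count: the reversed-row scan with break ('res += 1' while 0, stop at first non-zero)
def countZA : List Int → Int
  | [] => 0
  | x :: xs => if x = 0 then countZA xs + 1 else 0

-- the inner bubble: 'while j > idx: swap num_z[j-1],num_z[j]; swaps += 1; j -= 1' (indices always in range)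
def swapAdjA (zs : List Int) (j : Nat) : List Int :=
  (zs.set (j - 1) (zs.getD j 0)).set j (zs.getD (j - 1) 0)

def bubbleA (zs : List Int) (swaps : Int) (idx : Nat) : Nat → List Int × Int
  | j => if h : idx < j then bubbleA (swapAdjA zs j) (swaps + 1) idx (j - 1) else (zs, swaps)
termination_by j => j
decreasing_by omega

-- 'while j < n and num_z[j] < need: j += 1'
def searchA (zs : List Int) (n : Nat) (need : Int) (j : Nat) : Nat :=
  if h : j < n ∧ zs.getD j 0 < need then searchA zs n need (j + 1) else j
termination_by n - j
decreasing_by omega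

def loopA (n : Nat) (zs : List Int) (swaps : Int) (idx : Nat) : Int :=
  if h : idx < n then
    let need : Int := (n : Int) - (idx : Int) - 1
    if zs.getD idx 0 ≥ need then loopA n zs swaps (idx + 1)
    else
      let j := searchA zs n need idx
      if j = n then -1
      else
        let p := bubbleA zs swaps idx j
        loopA n p.1 p.2 (idx + 1)
  else swaps
termination_by n - idx
decreasing_by all_goals omega

def minSwaps (grid : List (List Int)) : Int :=
  loopA grid.length (grid.map (fun row => countZA row.reverse)) 0 0

-- ===== PORT B =====

-- forward scan: 'for i, v in enumerate(row): if v != 0: last = i'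
def lastLoop : List Int → Nat → Int → Int
  | [], _, last => last
  | v :: vs, i, last => lastLoop vs (i + 1) (if v ≠ 0 then (i : Int) else last)

def zcountB (row : List Int) : Int :=
  (row.length : Int) - 1 - lastLoop row 0 (-1)

-- 'next((j for j in range(n) if not used[j] and zs[j] >= need), None)'
def pick (zs : List Int) (used : List Bool) (need : Int) (n : Nat) (j : Nat) : Option Nat :=
  if _h : j < n then
    if used.getD j false = false ∧ zs.getD j 0 ≥ need then some j
    else pick zs used need n (j + 1)
  else none
termination_by n - j
decreasing_by omega

-- the selection loop: mark the chosen row used, append its index to p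
def selLoop (zs : List Int) (n : Nat) (used : List Bool) (p : List Nat) (idx : Nat) :
    Option (List Nat) :=
  if _h : idx < n then
    match pick zs used ((n : Int) - (idx : Int) - 1) n 0 with
    | none => none
    | some j => selLoop zs n (used.set j true) (p ++ [j]) (idx + 1)
  else some p
termination_by n - idx
decreasing_by omega

-- 'for s in range(n): inv += sum(1 for y in p[s+1:] if y < p[s])'
def invCount : List Nat → Int
  | [] => 0
  | x :: rest => ((rest.countP (fun y => y < x)) : Int) + invCount rest

def minSwaps_alt (grid : List (List Int)) : Int :=
  let n := grid.length
  let zs := grid.map zcountB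
  match selLoop zs n (List.replicate n false) [] 0 with
  | none => -1
  | some p => invCount p

-- ===== PRECONDITION & SPEC =====
def Spec_minSwaps (grid : List (List Int)) (out : Int) : Prop := out = minSwaps_alt grid
instance (grid : List (List Int)) (out : Int) : Decidable (Spec_minSwaps grid out) := by unfold Spec_minSwaps; infer_instance

-- ===== CLAIM (what is proved, stated in full; the proofs are below) =====
def Claim_equal_minSwaps : Prop := ∀ (grid : List (List Int)), Dom_minSwaps grid → Spec_minSwaps grid (minSwaps grid)

-- ===== LEMMAS AND PROOFS =====

-- ---- phase 1: the two trailing-zero computations agree ----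

lemma lastLoop_append (x : Int) : ∀ (xs : List Int) (i : Nat) (last : Int),
    lastLoop (xs ++ [x]) i last =
      if x ≠ 0 then ((i + xs.length : Nat) : Int) else lastLoop xs i last := by
  intro xs
  induction xs with
  | nil =>
    intro i last
    simp [lastLoop]
  | cons a tl ih =>
    intro i last
    rw [List.cons_append, lastLoop, ih, lastLoop]
    split
    · congr 1
      simp
      omega
    · rfl

lemma phase1 (row : List Int) : countZA row.reverse = zcountB row := by
  induction row using List.reverseRecOn with
  | nil => simp [countZA, zcountB, lastLoop]
  | append_singleton xs x ih =>
    rw [List.reverse_append]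
    simp only [List.reverse_cons, List.reverse_nil, List.nil_append, List.singleton_append]
    rw [countZA]
    unfold zcountB
    rw [lastLoop_append]
    by_cases hx : x = 0
    · rw [if_pos hx, if_neg (by simp [hx]), ih]
      unfold zcountB
      simp only [List.length_append, List.length_singleton]
      push_cast
      ring
    · rw [if_neg hx, if_pos hx]
      simp only [List.length_append, List.length_singleton, Nat.zero_add]
      push_cast
      ring

-- ---- generic list lemmas ----

lemma getD_append_off (c u : List Int) (r : Nat) :
    (c ++ u).getD (c.length + r) 0 = u.getD r 0 := by
  rw [List.getD_eq_getElem?_getD, List.getD_eq_getElem?_getD,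
    List.getElem?_append_right (by omega), Nat.add_sub_cancel_left]

lemma find?_findIdx {α : Type} (p : α → Bool) : ∀ (l : List α), l.find? p = l[l.findIdx p]? := by
  intro l
  induction l with
  | nil => rfl
  | cons a tl ih =>
    rw [List.find?_cons, List.findIdx_cons]
    by_cases h : p a
    · simp [h]
    · simp only [h, cond_false]
      rw [ih, List.getElem?_cons_succ]

lemma findIdx_map {α β : Type} (f : α → β) (p : β → Bool) : ∀ (l : List α),
    (l.map f).findIdx p = l.findIdx (fun x => p (f x)) := by
  intro l
  induction l with
  | nil => rfl
  | cons a tl ih =>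
    rw [List.map_cons, List.findIdx_cons, List.findIdx_cons, ih]

lemma map_eraseIdx {α β : Type} (f : α → β) : ∀ (l : List α) (r : Nat),
    (l.map f).eraseIdx r = (l.eraseIdx r).map f := by
  intro l
  induction l with
  | nil => intro r; rfl
  | cons a tl ih =>
    intro r
    cases r with
    | zero => rfl
    | succ s => simp only [List.map_cons, List.eraseIdx_cons_succ, List.map_cons, ih]

lemma eraseIdx_append_off (c u : List Int) (r : Nat) :
    (c ++ u).eraseIdx (c.length + r) = c ++ u.eraseIdx r := by
  induction c with
  | nil => simp
  | cons a ctl ih => simpa [List.length_cons, Nat.succ_add] using ih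

lemma filter_ne_eq_eraseIdx : ∀ (l : List Nat), l.Nodup → ∀ (r : Nat), r < l.length →
    l.filter (fun y => y != l.getD r 0) = l.eraseIdx r := by
  intro l
  induction l with
  | nil => intro _ r hr; simp at hr
  | cons a tl ih =>
    intro hnd r hr
    rcases List.nodup_cons.mp hnd with ⟨ha, htl⟩
    cases r with
    | zero =>
      simp only [List.getD_cons_zero, List.eraseIdx_cons_zero, List.filter_cons]
      rw [if_neg (by simp)]
      apply List.filter_eq_self.mpr
      intro y hy
      simp only [bne_iff_ne, ne_eq]
      exact fun h => ha (h ▸ hy)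
    | succ s =>
      have hs : s < tl.length := by simpa using hr
      have hmem : tl.getD s 0 ∈ tl := by
        rw [List.getD_eq_getElem tl 0 hs]; exact tl.getElem_mem hs
      simp only [List.getD_cons_succ, List.eraseIdx_cons_succ, List.filter_cons]
      rw [if_pos (by simp only [bne_iff_ne, ne_eq]; exact fun h => ha (h ▸ hmem)),
        ih htl s hs]

lemma countP_eraseIdx_lt : ∀ (l : List Nat), l.Pairwise (· < ·) → ∀ (r : Nat), r < l.length →
    (l.eraseIdx r).countP (fun y => y < l.getD r 0) = r := by
  intro l
  induction l with
  | nil => intro _ r hr; simp at hr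
  | cons a tl ih =>
    intro hp r hr
    rcases List.pairwise_cons.mp hp with ⟨ha, htl⟩
    cases r with
    | zero =>
      simp only [List.getD_cons_zero, List.eraseIdx_cons_zero]
      apply List.countP_eq_zero.mpr
      intro y hy
      simp only [decide_eq_true_eq, not_lt]
      exact Nat.le_of_lt (ha y hy)
    | succ s =>
      have hs : s < tl.length := by simpa using hr
      have hmem : tl.getD s 0 ∈ tl := by
        rw [List.getD_eq_getElem tl 0 hs]; exact tl.getElem_mem hs
      simp only [List.getD_cons_succ, List.eraseIdx_cons_succ]
      rw [List.countP_cons, ih htl s hs,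
        if_pos (by simpa [List.getD_eq_getElem?_getD] using ha _ hmem)]

-- ---- the set of still-unused indices, in increasing order ----

def unusedL (used : List Bool) : List Nat :=
  (List.range used.length).filter (fun k => !(used.getD k false))

lemma unusedL_pairwise (used : List Bool) : (unusedL used).Pairwise (· < ·) :=
  List.Pairwise.filter _ (List.pairwise_lt_range)

lemma unusedL_nodup (used : List Bool) : (unusedL used).Nodup :=
  (unusedL_pairwise used).imp Nat.ne_of_lt

lemma unusedL_lt (used : List Bool) {k : Nat} (h : k ∈ unusedL used) : k < used.length := by
  have := List.mem_filter.mp h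
  simpa using List.mem_range.mp this.1

lemma unusedL_set (used : List Bool) (j0 : Nat) (hj : j0 < used.length) :
    unusedL (used.set j0 true) = (unusedL used).filter (fun k => k != j0) := by
  unfold unusedL
  rw [List.length_set, List.filter_filter]
  apply List.filter_congr
  intro k hk
  have hkn : k < used.length := List.mem_range.mp hk
  by_cases hkj : k = j0
  · subst hkj
    rw [List.getD_eq_getElem?_getD, List.getElem?_set_self (by omega)]
    simp
  · rw [List.getD_eq_getElem?_getD, List.getElem?_set_ne (by omega),
      ← List.getD_eq_getElem?_getD]
    simp [hkj]

-- ---- pick is the first unused index satisfying the need ----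

lemma pick_eq (zs : List Int) (used : List Bool) (need : Int) (n : Nat) (hn : n = used.length) :
    ∀ (fuel j : Nat), j ≤ n → n - j ≤ fuel →
    pick zs used need n j =
      ((List.range' j (n - j)).filter (fun k => !(used.getD k false))).find?
        (fun k => need ≤ zs.getD k 0) := by
  intro fuel
  induction fuel with
  | zero =>
    intro j h1 h2
    have hj : j = n := by omega
    rw [pick]
    subst hj
    simp
  | succ f ih =>
    intro j h1 h2
    by_cases hjn : j < n
    · rw [pick, dif_pos hjn,
        show n - j = (n - (j + 1)) + 1 by omega, List.range'_succ, List.filter_cons]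
      by_cases hu : used.getD j false = false
      · rw [if_pos (show (!used.getD j false) = true by rw [hu]; rfl)]
        by_cases hz : zs.getD j 0 ≥ need
        · rw [if_pos ⟨hu, hz⟩, List.find?_cons]
          have hz' : decide (need ≤ zs[j]?.getD 0) = true := by
            rw [← List.getD_eq_getElem?_getD]; exact decide_eq_true hz
          simp [hz']
        · rw [if_neg (by tauto), List.find?_cons, ih (j + 1) (by omega) (by omega)]
          split
          · rename_i hq
            exfalso
            exact hz (by simpa [List.getD_eq_getElem?_getD] using of_decide_eq_true hq)
          · rfl
      · rw [if_neg (by tauto),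
          if_neg (show ¬ (!used.getD j false) = true by simpa using hu)]
        exact ih (j + 1) (by omega) (by omega)
    · rw [pick, dif_neg hjn]
      have hj : j = n := by omega
      subst hj
      simp

lemma pick_char (zs : List Int) (used : List Bool) (need : Int) (n : Nat) (hn : n = used.length) :
    pick zs used need n 0 =
      (unusedL used)[(unusedL used).findIdx (fun k => need ≤ zs.getD k 0)]? := by
  rw [pick_eq zs used need n hn n 0 (by omega) (by omega)]
  have he : (List.range' 0 (n - 0)).filter (fun k => !(used.getD k false)) = unusedL used := by
    rw [Nat.sub_zero, ← List.range_eq_range', hn]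
    rfl
  rw [he]
  exact find?_findIdx _ _

-- ---- selLoop: accumulator shape and permutation property ----

lemma selLoop_shape (zs : List Int) (n : Nat) :
    ∀ (fuel idx : Nat) (used : List Bool) (p : List Nat), n - idx ≤ fuel →
    selLoop zs n used p idx = Option.map (p ++ ·) (selLoop zs n used [] idx) := by
  intro fuel
  induction fuel with
  | zero =>
    intro idx used p h
    rw [selLoop, selLoop]
    have : ¬ idx < n := by omega
    rw [dif_neg this, dif_neg this]
    simp
  | succ f ih =>
    intro idx used p h
    rw [selLoop, selLoop]
    by_cases hidx : idx < n
    · rw [dif_pos hidx, dif_pos hidx]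
      cases hp : pick zs used ((n : Int) - (idx : Int) - 1) n 0 with
      | none => rfl
      | some j =>
        simp only []
        rw [ih (idx + 1) (used.set j true) (p ++ [j]) (by omega),
          ih (idx + 1) (used.set j true) ([] ++ [j]) (by omega)]
        cases selLoop zs n (used.set j true) [] (idx + 1) with
        | none => rfl
        | some rest => simp
    · rw [dif_neg hidx, dif_neg hidx]
      simp

lemma perm_cons_eraseIdx (l : List Nat) (r : Nat) (hr : r < l.length) :
    l.Perm (l.getD r 0 :: l.eraseIdx r) := by
  have hd : l.drop r = l.getD r 0 :: l.drop (r + 1) := by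
    rw [List.getD_eq_getElem l 0 hr]
    exact List.drop_eq_getElem_cons hr
  have hsplit : l = l.take r ++ l.getD r 0 :: l.drop (r + 1) := by
    conv_lhs => rw [← List.take_append_drop r l]
    rw [hd]
  rw [List.eraseIdx_eq_take_drop_succ]
  conv_lhs => rw [hsplit]
  exact List.perm_middle

lemma selLoop_perm (zs : List Int) (n : Nat) :
    ∀ (fuel idx : Nat) (used : List Bool) (fut : List Nat),
    used.length = n → (unusedL used).length = n - idx → idx ≤ n → n - idx ≤ fuel →
    selLoop zs n used [] idx = some fut → fut.Perm (unusedL used) := by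
  intro fuel
  induction fuel with
  | zero =>
    intro idx used fut h1 h2 h3 h4 hsel
    have hidx : ¬ idx < n := by omega
    rw [selLoop, dif_neg hidx] at hsel
    cases hsel
    have : unusedL used = [] := List.length_eq_zero_iff.mp (by omega)
    rw [this]
  | succ f ih =>
    intro idx used fut h1 h2 h3 h4 hsel
    by_cases hidx : idx < n
    · rw [selLoop, dif_pos hidx] at hsel
      set need : Int := (n : Int) - (idx : Int) - 1 with hneed
      cases hp : pick zs used need n 0 with
      | none => rw [hp] at hsel; cases hsel
      | some j0 =>
        rw [hp] at hsel
        simp only [] at hsel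
        -- j0 = (unusedL used)[r] for r = findIdx
        rw [pick_char zs used need n h1.symm] at hp
        set l := unusedL used with hl
        set r := l.findIdx (fun k => need ≤ zs.getD k 0) with hr
        have hrlt : r < l.length := by
          by_contra hge
          rw [List.getElem?_eq_none (by omega)] at hp
          cases hp
        have hj0 : j0 = l.getD r 0 := by
          rw [List.getElem?_eq_getElem hrlt] at hp
          cases hp
          exact (List.getD_eq_getElem l 0 hrlt).symm
        have hj0mem : j0 ∈ l := by
          rw [hj0, List.getD_eq_getElem l 0 hrlt]; exact l.getElem_mem hrlt
        have hj0n : j0 < used.length := unusedL_lt used hj0mem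
        have hset : unusedL (used.set j0 true) = l.eraseIdx r := by
          rw [unusedL_set used j0 hj0n, hj0]
          exact filter_ne_eq_eraseIdx l (unusedL_nodup used) r hrlt
        rw [selLoop_shape zs n f (idx + 1) (used.set j0 true) ([] ++ [j0]) (by omega)] at hsel
        cases hc : selLoop zs n (used.set j0 true) [] (idx + 1) with
        | none => rw [hc] at hsel; cases hsel
        | some fut' =>
          rw [hc] at hsel
          simp only [Option.map_some, List.nil_append, List.singleton_append] at hsel
          cases hsel
          have hperm' : fut'.Perm (unusedL (used.set j0 true)) :=
            ih (idx + 1) (used.set j0 true) fut' (by rw [List.length_set]; exact h1)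
              (by rw [hset, List.length_eraseIdx_of_lt hrlt]; omega) (by omega) (by omega) hc
          rw [hset] at hperm'
          have h1 : (j0 :: fut').Perm (j0 :: l.eraseIdx r) := hperm'.cons j0
          have h2 : l.Perm (j0 :: l.eraseIdx r) := by
            rw [hj0]
            exact perm_cons_eraseIdx l r hrlt
          exact h1.trans h2.symm
    · rw [selLoop, dif_neg hidx] at hsel
      cases hsel
      have : unusedL used = [] := List.length_eq_zero_iff.mp (by omega)
      rw [this]

-- (main loop correspondence and remaining proofs below)

lemma move_self (zs : List Int) (i : Nat) (h : i < zs.length) :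
    (zs.eraseIdx i).take i ++ zs.getD i 0 :: (zs.eraseIdx i).drop i = zs := by
  have hlt : (zs.take i).length = i := by simp; omega
  rw [List.eraseIdx_eq_take_drop_succ]
  rw [List.take_append_of_le_length (by omega), List.take_take, min_self]
  have hd : ∀ l2 : List Int, ((zs.take i) ++ l2).drop i = l2 := by
    intro l2
    have h0 := List.drop_left (l₁ := zs.take i) (l₂ := l2)
    rw [hlt] at h0
    exact h0
  rw [hd _, List.getD_eq_getElem zs 0 h, List.getElem_cons_drop, List.take_append_drop]

lemma length_swapAdjA (zs : List Int) (j : Nat) : (swapAdjA zs j).length = zs.length := by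
  simp [swapAdjA]

lemma swapAdjA_eraseIdx (zs : List Int) (j : Nat) (h1 : 0 < j) (h2 : j < zs.length) :
    (swapAdjA zs j).eraseIdx (j - 1) = zs.eraseIdx j := by
  apply List.ext_getElem?
  intro n
  simp only [List.getElem?_eraseIdx, swapAdjA, List.getElem?_set, List.length_set]
  rcases lt_trichotomy n (j - 1) with hn | hn | hn
  · rw [if_pos hn, if_pos (show n < j by omega),
      if_neg (show ¬ j = n by omega), if_neg (show ¬ j - 1 = n by omega)]
  · rw [if_neg (show ¬ n < j - 1 by omega), if_pos (show n < j by omega),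
      if_pos (show j = n + 1 by omega), if_pos (show j < zs.length by omega)]
    rw [List.getD_eq_getElem?_getD,
      List.getElem?_eq_getElem (show j - 1 < zs.length by omega),
      List.getElem?_eq_getElem (show n < zs.length by omega)]
    simp only [Option.getD_some]
    subst hn
    rfl
  · rw [if_neg (show ¬ n < j - 1 by omega), if_neg (show ¬ n < j by omega),
      if_neg (show ¬ j = n + 1 by omega), if_neg (show ¬ j - 1 = n + 1 by omega)]

lemma swapAdjA_getD (zs : List Int) (j : Nat) (h1 : 0 < j) (h2 : j < zs.length) :
    (swapAdjA zs j).getD (j - 1) 0 = zs.getD j 0 := by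
  simp only [swapAdjA, List.getD_eq_getElem?_getD, List.getElem?_set, List.length_set]
  rw [if_neg (show ¬ j = j - 1 by omega)]
  simp [show j - 1 < zs.length by omega]

lemma bubbleA_eq : ∀ (j : Nat) (zs : List Int) (swaps : Int) (idx : Nat),
    idx ≤ j → j < zs.length →
    bubbleA zs swaps idx j =
      ((zs.eraseIdx j).take idx ++ zs.getD j 0 :: (zs.eraseIdx j).drop idx,
       swaps + ((j : Int) - (idx : Int))) := by
  intro j
  induction j with
  | zero =>
    intro zs swaps idx h1 h2
    have hidx : idx = 0 := by omega
    subst hidx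
    rw [bubbleA]
    simp only [Nat.lt_irrefl, dite_false]
    rw [move_self zs 0 h2]
    simp
  | succ k ih =>
    intro zs swaps idx h1 h2
    rw [bubbleA]
    by_cases h : idx < k + 1
    · rw [dif_pos h]
      have hk : k + 1 - 1 = k := by omega
      rw [hk]
      rw [ih (swapAdjA zs (k + 1)) (swaps + 1) idx (by omega)
            (by rw [length_swapAdjA]; omega)]
      have e1 := swapAdjA_eraseIdx zs (k + 1) (by omega) h2
      have e2 := swapAdjA_getD zs (k + 1) (by omega) h2
      rw [show (k + 1) - 1 = k from rfl] at e1 e2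
      rw [e1, e2]
      congr 1
      push_cast
      ring
    · rw [dif_neg h]
      have hidx : idx = k + 1 := by omega
      subst hidx
      rw [move_self zs (k + 1) h2]
      simp

lemma searchA_eq : ∀ (u c : List Int) (need : Int) (n : Nat), n = c.length + u.length →
    searchA (c ++ u) n need c.length = c.length + u.findIdx (fun v => need ≤ v) := by
  intro u
  induction u with
  | nil =>
    intro c need n hn
    rw [searchA, dif_neg (by rintro ⟨hlt, _⟩; simp at hn; omega)]
    simp
  | cons v u' ih =>
    intro c need n hn
    have hget : (c ++ v :: u').getD c.length 0 = v := by
      have h0 := getD_append_off c (v :: u') 0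
      simp only [Nat.add_zero] at h0
      rw [h0, List.getD_cons_zero]
    rw [List.findIdx_cons]
    by_cases hv : need ≤ v
    · rw [searchA, dif_neg (by rw [hget]; omega)]
      simp [hv]
    · rw [searchA, dif_pos ⟨by simp at hn ⊢; omega, by rw [hget]; omega⟩]
      have hre : c ++ v :: u' = (c ++ [v]) ++ u' := by simp
      have hlen : c.length + 1 = (c ++ [v]).length := by simp
      rw [hre, hlen, ih (c ++ [v]) need n (by simp at hn ⊢; omega)]
      simp [hv]
      omega

-- ---- the main correspondence ----

lemma main_loop (zs : List Int) (n : Nat) :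
    ∀ (fuel idx : Nat) (used : List Bool) (c : List Int) (s : Int),
    used.length = n → c.length = idx → idx ≤ n → (unusedL used).length = n - idx →
    n - idx ≤ fuel →
    loopA n (c ++ (unusedL used).map (fun k => zs.getD k 0)) s idx =
      (match selLoop zs n used [] idx with
       | none => -1
       | some fut => s + invCount fut) := by
  intro fuel
  induction fuel with
  | zero =>
    intro idx used c s h1 h2 h3 h4 h5
    have hidx : ¬ idx < n := by omega
    rw [loopA, dif_neg hidx, selLoop, dif_neg hidx]
    simp [invCount]
  | succ f ih =>
    intro idx used c s h1 h2 h3 h4 h5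
    by_cases hidx : idx < n
    · set need : Int := (n : Int) - (idx : Int) - 1 with hneed
      set l := unusedL used with hl
      set fv : Nat → Int := fun k => zs.getD k 0 with hfv
      set u : List Int := l.map fv with hu
      have hul : u.length = n - idx := by rw [hu, List.length_map]; exact h4
      have hzlen : (c ++ u).length = n := by rw [List.length_append]; omega
      set r := l.findIdx (fun k => need ≤ zs.getD k 0) with hr
      have hfind : u.findIdx (fun v => need ≤ v) = r := by
        rw [hu, findIdx_map]
      have hpick : pick zs used need n 0 = l[r]? := pick_char zs used need n h1.symm
      rw [selLoop, dif_pos hidx]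
      rw [loopA, dif_pos hidx]
      simp only [← hneed]
      by_cases hrlt : r < l.length
      · -- a row is found: j0 = l[r]
        have hur : r < u.length := by rw [hu, List.length_map]; exact hrlt
        set j0 := l.getD r 0 with hj0
        have hpick' : pick zs used need n 0 = some j0 := by
          rw [hpick, List.getElem?_eq_getElem hrlt, hj0, List.getD_eq_getElem l 0 hrlt]
        have hj0mem : j0 ∈ l := by
          rw [hj0, List.getD_eq_getElem l 0 hrlt]; exact l.getElem_mem hrlt
        have hj0n : j0 < used.length := unusedL_lt used hj0mem
        have hset : unusedL (used.set j0 true) = l.eraseIdx r :=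
          (unusedL_set used j0 hj0n).trans
            (filter_ne_eq_eraseIdx l (unusedL_nodup used) r hrlt)
        have hgetr : (c ++ u).getD (idx + r) 0 = fv j0 := by
          rw [← h2, getD_append_off, hu, hj0,
            List.getD_eq_getElem (l.map fv) 0 (by simpa using hrlt),
            List.getElem_map, List.getD_eq_getElem l 0 hrlt]
        -- the recursive state
        have hrec : (c ++ [fv j0]) ++ (unusedL (used.set j0 true)).map fv
            = c ++ fv j0 :: (u.eraseIdx r) := by
          rw [hset, ← map_eraseIdx, ← hu]
          simp
        have hIH := ih (idx + 1) (used.set j0 true) (c ++ [fv j0]) (s + (r : Int))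
          (by rw [List.length_set]; exact h1) (by simp [h2]) (by omega)
          (by rw [hset, List.length_eraseIdx_of_lt hrlt]; omega) (by omega)
        rw [hrec] at hIH
        -- RHS: unfold using shape lemma
        rw [hpick']
        simp only []
        rw [selLoop_shape zs n f (idx + 1) (used.set j0 true) ([] ++ [j0]) (by omega)]
        -- relate counts
        have hcount : ∀ fut' : List Nat,
            selLoop zs n (used.set j0 true) [] (idx + 1) = some fut' →
            (fut'.countP (fun y => y < j0) : Int) = (r : Int) := by
          intro fut' hc
          have hperm : fut'.Perm (unusedL (used.set j0 true)) :=
            selLoop_perm zs n f (idx + 1) (used.set j0 true) fut'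
              (by rw [List.length_set]; exact h1)
              (by rw [hset, List.length_eraseIdx_of_lt hrlt]; omega)
              (by omega) (by omega) hc
          rw [hperm.countP_eq, hset, hj0]
          rw [countP_eraseIdx_lt l (unusedL_pairwise used) r hrlt]
        -- now case on the first branch of loopA
        by_cases hcont : (c ++ u).getD idx 0 ≥ need
        · -- A's continue branch: r must be 0
          have hu0 : (c ++ u).getD idx 0 = u.getD 0 0 := by
            rw [← h2]
            simpa using getD_append_off c u 0
          have hlne : l ≠ [] := by
            intro h0
            rw [h0] at hrlt
            simp at hrlt
          have hr0 : r = 0 := by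
            cases hl0 : l with
            | nil => exact absurd hl0 hlne
            | cons a tl =>
              rw [hu0, hu, hl0] at hcont
              simp only [List.map_cons, List.getD_cons_zero, hfv] at hcont
              have hq : decide (need ≤ zs.getD a 0) = true := decide_eq_true hcont
              rw [hr, hl0, List.findIdx_cons, hq, cond_true]
          rw [if_pos hcont]
          -- zs unchanged: c ++ u = (c ++ [fv j0]) ++ map fv (eraseIdx 0)
          have hstate : c ++ u = c ++ fv j0 :: u.eraseIdx r := by
            cases hl0 : l with
            | nil => exact absurd hl0 hlne
            | cons a tl =>
              have : j0 = a := by rw [hj0, hr0, hl0, List.getD_cons_zero]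
              rw [hu, hl0, this, hr0]
              simp
          rw [hr0] at hstate hIH
          simp only [Nat.cast_zero, add_zero] at hIH
          rw [hstate, hIH]
          cases hc : selLoop zs n (used.set j0 true) [] (idx + 1) with
          | none => rfl
          | some fut' =>
            simp only [Option.map_some, List.nil_append, List.singleton_append]
            rw [invCount, hcount fut' hc, hr0]
            push_cast
            ring
        · -- A's search branch
          rw [if_neg hcont]
          have hsearch : searchA (c ++ u) n need idx = idx + r := by
            rw [← h2, searchA_eq u c need n (by omega), hfind, h2]
          rw [hsearch, if_neg (by omega)]
          rw [bubbleA_eq (idx + r) (c ++ u) s idx (by omega) (by omega)]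
          simp only []
          have herase : (c ++ u).eraseIdx (idx + r) = c ++ u.eraseIdx r := by
            rw [← h2]; exact eraseIdx_append_off c u r
          have htake : (c ++ u.eraseIdx r).take idx = c := by
            rw [← h2]; exact List.take_left
          have hdrop : (c ++ u.eraseIdx r).drop idx = u.eraseIdx r := by
            rw [← h2]; exact List.drop_left
          rw [herase, htake, hdrop, hgetr]
          have hsw : s + (((idx + r : Nat) : Int) - (idx : Int)) = s + (r : Int) := by
            push_cast; ring
          rw [hsw, hIH]
          cases hc : selLoop zs n (used.set j0 true) [] (idx + 1) with
          | none => rfl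
          | some fut' =>
            simp only [Option.map_some, List.nil_append, List.singleton_append]
            rw [invCount, hcount fut' hc]
            ring_nf
      · -- no eligible row: A returns -1 and pick is none
        have hreq : r = l.length := by
          have hle : r ≤ l.length := by rw [hr]; exact List.findIdx_le_length
          omega
        have hpick' : pick zs used need n 0 = none := by
          rw [hpick, List.getElem?_eq_none (by omega)]
        have hcont : ¬ (c ++ u).getD idx 0 ≥ need := by
          intro hge
          have hu0 : (c ++ u).getD idx 0 = u.getD 0 0 := by
            rw [← h2]
            simpa using getD_append_off c u 0
          cases hl0 : l with
          | nil =>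
            rw [hu0, hu, hl0] at hge
            simp at hge
            -- u = [], so getD = 0; but also n - idx = 0 contradicting idx < n
            rw [hl0] at h4
            simp at h4
            omega
          | cons a tl =>
            have : r = 0 := by
              rw [hu0, hu, hl0] at hge
              simp only [List.map_cons, List.getD_cons_zero, hfv] at hge
              have hq : decide (need ≤ zs.getD a 0) = true := decide_eq_true hge
              rw [hr, hl0, List.findIdx_cons, hq, cond_true]
            rw [hl0] at hreq
            simp at hreq
            omega
        rw [if_neg hcont]
        have hsearch : searchA (c ++ u) n need idx = n := by
          rw [← h2, searchA_eq u c need n (by omega), hfind, h2]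
          omega
        rw [hsearch, if_pos rfl, hpick']
    · rw [loopA, dif_neg hidx, selLoop, dif_neg hidx]
      simp [invCount]

lemma replicate_unused (n : Nat) : unusedL (List.replicate n false) = List.range n := by
  unfold unusedL
  rw [List.length_replicate]
  apply List.filter_eq_self.mpr
  intro k hk
  have hkn : k < n := List.mem_range.mp hk
  rw [List.getD_eq_getElem?_getD, List.getElem?_replicate]
  simp [hkn]

lemma map_getD_range (zs : List Int) (n : Nat) (h : zs.length = n) :
    (List.range n).map (fun k => zs.getD k 0) = zs := by
  apply List.ext_getElem
  · simp [h]
  · intro i h1 h2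
    simp only [List.getElem_map, List.getElem_range]
    rw [List.getD_eq_getElem zs 0 h2]

-- ===== VERDICT (by name: the statement is the Claim_ definition above) =====
theorem minSwaps_spec : Claim_equal_minSwaps := by
  intro grid _
  show minSwaps grid = minSwaps_alt grid
  unfold minSwaps minSwaps_alt
  simp only []
  set n := grid.length with hn
  set zs := grid.map zcountB with hzs
  have hmap : grid.map (fun row => countZA row.reverse) = zs :=
    List.map_congr_left (fun row _ => phase1 row)
  have hlen : zs.length = n := by rw [hzs, List.length_map]
  have h0 := main_loop zs n n 0 (List.replicate n false) [] 0
    (by simp) rfl (by omega)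
    (by rw [replicate_unused]; simp) (by omega)
  rw [replicate_unused, map_getD_range zs n hlen] at h0
  simp only [List.nil_append] at h0
  rw [hmap, h0]
  cases selLoop zs n (List.replicate n false) [] 0 with
  | none => rfl
  | some p => simp
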